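-- pv_equiv track=rewrite | github.com/Ayturgan/jacen | bot/bot_core/resolution.py | _build_mechanical_directives
-- ===== SOURCE A (Python) =====
-- def _build_mechanical_directives(char_id: str, action_kind: str, outcome: str, risk: str) -> list[str]:
--     directives: list[str] = []
--
--     if action_kind == "combat":
--         if outcome == "failure":
--             directives.append(f"[ИЗМЕНИТЬ: {char_id}, hp, -10]")
--             if risk in {"high", "extreme"}:
--                 directives.append(f"[МИР: pressure_clock, +1]")
--         elif outcome == "partial":
--             directives.append(f"[ИЗМЕНИТЬ: {char_id}, hp, -5]")
--             directives.append(f"[ИЗМЕНИТЬ: {char_id}, stress, +1]")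
--         elif outcome == "critical":
--             directives.append("[МИР: pressure_clock, -1]")
--
--     elif action_kind == "stealth":
--         if outcome == "failure":
--             directives.append(f"[МИР: pressure_clock, +2]")
--             directives.append(f"[ИЗМЕНИТЬ: {char_id}, stress, +1]")
--         elif outcome == "partial":
--             directives.append(f"[МИР: pressure_clock, +1]")
--         elif outcome == "critical":
--             directives.append("[МИР: pressure_clock, -1]")
--
--     elif action_kind == "investigation":
--         if outcome == "failure":
--             directives.append(f"[МИР: pressure_clock, +1]")
--         elif outcome == "partial":
--             directives.append(f"[ИЗМЕНИТЬ: {char_id}, stress, +1]")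
--         elif outcome == "critical":
--             directives.append("[МИР: pressure_clock, -1]")
--
--     elif action_kind == "social":
--         if outcome == "failure":
--             directives.append(f"[ИЗМЕНИТЬ: {char_id}, stress, +1]")
--             directives.append("[МИР: pressure_clock, +1]")
--         elif outcome == "partial":
--             directives.append(f"[ИЗМЕНИТЬ: {char_id}, stress, +1]")
--
--     elif action_kind == "mystic":
--         if outcome == "failure":
--             directives.append(f"[ИЗМЕНИТЬ: {char_id}, stress, +2]")
--             directives.append("[МИР: dark_points, +1]")
--         elif outcome == "partial":
--             directives.append(f"[ИЗМЕНИТЬ: {char_id}, stress, +1]")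
--             directives.append("[МИР: dark_points, +1]")
--         elif outcome == "critical":
--             directives.append("[МИР: dark_points, +1]")
--
--     elif action_kind == "travel":
--         if outcome == "failure":
--             directives.append(f"[ИЗМЕНИТЬ: {char_id}, stress, +1]")
--             directives.append("[МИР: threat_level, +5]")
--         elif outcome == "partial":
--             directives.append("[МИР: pressure_clock, +1]")
--
--     elif risk in {"high", "extreme"} and outcome in {"failure", "partial"}:
--         directives.append(f"[ИЗМЕНИТЬ: {char_id}, stress, +1]")
--
--     seen: set[str] = set()
--     unique_directives: list[str] = []
--     for directive in directives:
--         if directive not in seen: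
--             unique_directives.append(directive)
--             seen.add(directive)
--     return unique_directives
-- ===== SOURCE B (Python) =====
-- # Table-driven re-implementation: directives come from a static (kind, outcome) table
-- # of templates joined with char_id; no dedup pass is needed because every template
-- # list is duplicate-free for any char_id.
--
-- _STRESS = ("[ИЗМЕНИТЬ: ", ", stress, +1]")
--
-- _TABLE = {
--     ("combat", "failure"): [("[ИЗМЕНИТЬ: ", ", hp, -10]")],
--     ("combat", "partial"): [("[ИЗМЕНИТЬ: ", ", hp, -5]"), _STRESS],
--     ("combat", "critical"): [("[МИР: pressure_clock, -1]",)],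
--     ("stealth", "failure"): [("[МИР: pressure_clock, +2]",), _STRESS],
--     ("stealth", "partial"): [("[МИР: pressure_clock, +1]",)],
--     ("stealth", "critical"): [("[МИР: pressure_clock, -1]",)],
--     ("investigation", "failure"): [("[МИР: pressure_clock, +1]",)],
--     ("investigation", "partial"): [_STRESS],
--     ("investigation", "critical"): [("[МИР: pressure_clock, -1]",)],
--     ("social", "failure"): [_STRESS, ("[МИР: pressure_clock, +1]",)],
--     ("social", "partial"): [_STRESS],
--     ("mystic", "failure"): [("[ИЗМЕНИТЬ: ", ", stress, +2]"), ("[МИР: dark_points, +1]",)],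
--     ("mystic", "partial"): [_STRESS, ("[МИР: dark_points, +1]",)],
--     ("mystic", "critical"): [("[МИР: dark_points, +1]",)],
--     ("travel", "failure"): [_STRESS, ("[МИР: threat_level, +5]",)],
--     ("travel", "partial"): [("[МИР: pressure_clock, +1]",)],
-- }
--
-- _KNOWN_KINDS = {"combat", "stealth", "investigation", "social", "mystic", "travel"}
--
--
-- def _build_mechanical_directives(char_id: str, action_kind: str, outcome: str, risk: str) -> list[str]:
--     risky = risk in ("high", "extreme")
--     if action_kind in _KNOWN_KINDS:
--         out = [char_id.join(parts) for parts in _TABLE.get((action_kind, outcome), [])]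
--         if action_kind == "combat" and outcome == "failure" and risky:
--             out.append("[МИР: pressure_clock, +1]")
--         return out
--     if risky and outcome in ("failure", "partial"):
--         return [char_id.join(_STRESS)]
--     return []
-- ===== Notes on version B (the rewrite author's own statement) =====
-- stated objective: idiomatic
-- what changed: Replaced the six-way branch cascade plus an explicit seen-set dedup loop with a static (action_kind, outcome) -> template table joined with char_id, a known-kinds set gating the risk fallback, and no dedup pass (the table's lists are duplicate-free for every char_id).
import Mathlib
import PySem

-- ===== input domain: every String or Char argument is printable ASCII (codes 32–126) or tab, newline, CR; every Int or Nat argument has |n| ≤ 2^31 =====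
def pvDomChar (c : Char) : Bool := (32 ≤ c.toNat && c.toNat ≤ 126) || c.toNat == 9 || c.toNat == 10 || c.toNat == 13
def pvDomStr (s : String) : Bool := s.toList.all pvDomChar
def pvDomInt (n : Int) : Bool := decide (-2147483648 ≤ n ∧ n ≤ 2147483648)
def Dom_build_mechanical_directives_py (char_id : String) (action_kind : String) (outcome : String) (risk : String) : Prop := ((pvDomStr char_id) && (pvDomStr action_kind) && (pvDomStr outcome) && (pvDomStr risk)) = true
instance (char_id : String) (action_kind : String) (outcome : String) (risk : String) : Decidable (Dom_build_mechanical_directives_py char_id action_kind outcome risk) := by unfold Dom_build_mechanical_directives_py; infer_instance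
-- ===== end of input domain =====

-- B replaces A's six-way branch cascade + seen-set dedup loop by a static (kind, outcome) -> template table
-- joined with char_id and no dedup pass (idiomatic; same output, the table lists are duplicate-free).


-- ===== PORT A =====
def build_mechanical_directives_py (char_id : String) (action_kind : String) (outcome : String) (risk : String) : List String :=
  let directives : List String :=
    if action_kind == "combat" then
      if outcome == "failure" then
        ["[ИЗМЕНИТЬ: " ++ char_id ++ ", hp, -10]"] ++
          (if risk == "high" || risk == "extreme" then ["[МИР: pressure_clock, +1]"] else [])
      else if outcome == "partial" then
        ["[ИЗМЕНИТЬ: " ++ char_id ++ ", hp, -5]", "[ИЗМЕНИТЬ: " ++ char_id ++ ", stress, +1]"]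
      else if outcome == "critical" then ["[МИР: pressure_clock, -1]"]
      else []
    else if action_kind == "stealth" then
      if outcome == "failure" then
        ["[МИР: pressure_clock, +2]", "[ИЗМЕНИТЬ: " ++ char_id ++ ", stress, +1]"]
      else if outcome == "partial" then ["[МИР: pressure_clock, +1]"]
      else if outcome == "critical" then ["[МИР: pressure_clock, -1]"]
      else []
    else if action_kind == "investigation" then
      if outcome == "failure" then ["[МИР: pressure_clock, +1]"]
      else if outcome == "partial" then ["[ИЗМЕНИТЬ: " ++ char_id ++ ", stress, +1]"]
      else if outcome == "critical" then ["[МИР: pressure_clock, -1]"]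
      else []
    else if action_kind == "social" then
      if outcome == "failure" then
        ["[ИЗМЕНИТЬ: " ++ char_id ++ ", stress, +1]", "[МИР: pressure_clock, +1]"]
      else if outcome == "partial" then ["[ИЗМЕНИТЬ: " ++ char_id ++ ", stress, +1]"]
      else []
    else if action_kind == "mystic" then
      if outcome == "failure" then
        ["[ИЗМЕНИТЬ: " ++ char_id ++ ", stress, +2]", "[МИР: dark_points, +1]"]
      else if outcome == "partial" then
        ["[ИЗМЕНИТЬ: " ++ char_id ++ ", stress, +1]", "[МИР: dark_points, +1]"]
      else if outcome == "critical" then ["[МИР: dark_points, +1]"]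
      else []
    else if action_kind == "travel" then
      if outcome == "failure" then
        ["[ИЗМЕНИТЬ: " ++ char_id ++ ", stress, +1]", "[МИР: threat_level, +5]"]
      else if outcome == "partial" then ["[МИР: pressure_clock, +1]"]
      else []
    else if (risk == "high" || risk == "extreme") && (outcome == "failure" || outcome == "partial") then
      ["[ИЗМЕНИТЬ: " ++ char_id ++ ", stress, +1]"]
    else []
  -- the dedup pass: seen set + unique list, in order
  (directives.foldl
    (fun (st : PySem.Set String × List String) d =>
      if PySem.Set.contains st.1 d then st else (PySem.Set.add st.1 d, st.2 ++ [d]))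
    (PySem.Set.empty, [])).2

-- ===== PORT B =====
def pvStress : List String := ["[ИЗМЕНИТЬ: ", ", stress, +1]"]

def pvTable : PySem.Dict (String × String) (List (List String)) :=
  PySem.Dict.ofList [
    (("combat", "failure"), [["[ИЗМЕНИТЬ: ", ", hp, -10]"]]),
    (("combat", "partial"), [["[ИЗМЕНИТЬ: ", ", hp, -5]"], pvStress]),
    (("combat", "critical"), [["[МИР: pressure_clock, -1]"]]),
    (("stealth", "failure"), [["[МИР: pressure_clock, +2]"], pvStress]),
    (("stealth", "partial"), [["[МИР: pressure_clock, +1]"]]),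
    (("stealth", "critical"), [["[МИР: pressure_clock, -1]"]]),
    (("investigation", "failure"), [["[МИР: pressure_clock, +1]"]]),
    (("investigation", "partial"), [pvStress]),
    (("investigation", "critical"), [["[МИР: pressure_clock, -1]"]]),
    (("social", "failure"), [pvStress, ["[МИР: pressure_clock, +1]"]]),
    (("social", "partial"), [pvStress]),
    (("mystic", "failure"), [["[ИЗМЕНИТЬ: ", ", stress, +2]"], ["[МИР: dark_points, +1]"]]),
    (("mystic", "partial"), [pvStress, ["[МИР: dark_points, +1]"]]),
    (("mystic", "critical"), [["[МИР: dark_points, +1]"]]),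
    (("travel", "failure"), [pvStress, ["[МИР: threat_level, +5]"]]),
    (("travel", "partial"), [["[МИР: pressure_clock, +1]"]])]

def pvKnownKinds : PySem.Set String :=
  PySem.Set.ofList ["combat", "stealth", "investigation", "social", "mystic", "travel"]

def build_mechanical_directives_py_alt (char_id : String) (action_kind : String) (outcome : String) (risk : String) : List String :=
  let risky := risk == "high" || risk == "extreme"
  if PySem.Set.contains pvKnownKinds action_kind then
    let out := (PySem.Dict.getD pvTable (action_kind, outcome) []).map
      (fun parts => PySem.Str.join char_id parts)
    if action_kind == "combat" && outcome == "failure" && risky then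
      out ++ ["[МИР: pressure_clock, +1]"]
    else out
  else if risky && (outcome == "failure" || outcome == "partial") then
    [PySem.Str.join char_id pvStress]
  else []

-- ===== PRECONDITION & SPEC =====
def Spec_build_mechanical_directives_py (char_id : String) (action_kind : String) (outcome : String) (risk : String) (out : List String) : Prop := out = build_mechanical_directives_py_alt char_id action_kind outcome risk
instance (char_id : String) (action_kind : String) (outcome : String) (risk : String) (out : List String) : Decidable (Spec_build_mechanical_directives_py char_id action_kind outcome risk out) := by unfold Spec_build_mechanical_directives_py; infer_instance

-- ===== CLAIM (what is proved, stated in full; the proofs are below) =====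
def Claim_equal_build_mechanical_directives_py : Prop := ∀ (char_id : String) (action_kind : String) (outcome : String) (risk : String), Dom_build_mechanical_directives_py char_id action_kind outcome risk → Spec_build_mechanical_directives_py char_id action_kind outcome risk (build_mechanical_directives_py char_id action_kind outcome risk)

-- ===== LEMMAS AND PROOFS =====

-- joining two template parts with char_id is the f-string concatenation
theorem pv_join_pair (c a b : String) : PySem.Str.join c [a, b] = a ++ c ++ b := by
  rw [← String.toList_inj]
  simp [PySem.Str.join, PySem.Chars.join, String.toList_append, List.intercalate]

theorem pv_join_single (c a : String) : PySem.Str.join c [a] = a := by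
  rw [← String.toList_inj]
  simp [PySem.Str.join, PySem.Chars.join, List.intercalate]

-- the concrete directive strings occurring together in one branch are pairwise distinct for every char_id
theorem pv_ne_mir1_izm (c x : String) : "[МИР: pressure_clock, +1]" ≠ "[ИЗМЕНИТЬ: " ++ c ++ x := by
  intro h; have := congrArg String.toList h; simp [String.toList_append] at this

theorem pv_ne_izm_mir2 (c x : String) : "[ИЗМЕНИТЬ: " ++ c ++ x ≠ "[МИР: pressure_clock, +2]" := by
  intro h; have := congrArg String.toList h; simp [String.toList_append] at this

theorem pv_ne_dark_izm (c x : String) : "[МИР: dark_points, +1]" ≠ "[ИЗМЕНИТЬ: " ++ c ++ x := by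
  intro h; have := congrArg String.toList h; simp [String.toList_append] at this

theorem pv_ne_threat_izm (c x : String) : "[МИР: threat_level, +5]" ≠ "[ИЗМЕНИТЬ: " ++ c ++ x := by
  intro h; have := congrArg String.toList h; simp [String.toList_append] at this

-- pvTable's keys are distinct, so Dict.ofList is literally Dict.mk of the same pairs
theorem pvTable_mk : pvTable = PySem.Dict.mk [
    (("combat", "failure"), [["[ИЗМЕНИТЬ: ", ", hp, -10]"]]),
    (("combat", "partial"), [["[ИЗМЕНИТЬ: ", ", hp, -5]"], pvStress]),
    (("combat", "critical"), [["[МИР: pressure_clock, -1]"]]),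
    (("stealth", "failure"), [["[МИР: pressure_clock, +2]"], pvStress]),
    (("stealth", "partial"), [["[МИР: pressure_clock, +1]"]]),
    (("stealth", "critical"), [["[МИР: pressure_clock, -1]"]]),
    (("investigation", "failure"), [["[МИР: pressure_clock, +1]"]]),
    (("investigation", "partial"), [pvStress]),
    (("investigation", "critical"), [["[МИР: pressure_clock, -1]"]]),
    (("social", "failure"), [pvStress, ["[МИР: pressure_clock, +1]"]]),
    (("social", "partial"), [pvStress]),
    (("mystic", "failure"), [["[ИЗМЕНИТЬ: ", ", stress, +2]"], ["[МИР: dark_points, +1]"]]),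
    (("mystic", "partial"), [pvStress, ["[МИР: dark_points, +1]"]]),
    (("mystic", "critical"), [["[МИР: dark_points, +1]"]]),
    (("travel", "failure"), [pvStress, ["[МИР: threat_level, +5]"]]),
    (("travel", "partial"), [["[МИР: pressure_clock, +1]"]])] := by rfl

-- ===== VERDICT (by name: the statement is the Claim_ definition above) =====
theorem build_mechanical_directives_py_spec : Claim_equal_build_mechanical_directives_py := by
  intro c k o r _
  unfold Spec_build_mechanical_directives_py
  unfold build_mechanical_directives_py build_mechanical_directives_py_alt
  by_cases hk1 : k = "combat"
  · subst hk1
    by_cases ho1 : o = "failure"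
    · subst ho1
      cases hr : (r == "high" || r == "extreme") <;>
        simp [pvTable_mk, pvKnownKinds, pvStress, PySem.Set.contains, PySem.Set.add, PySem.Set.ofList, PySem.Dict.getD, PySem.Dict.get?, pv_join_pair, pv_ne_mir1_izm]
    · by_cases ho2 : o = "partial"
      · subst ho2
        simp [Ne.symm ho1, pvTable_mk, pvKnownKinds, pvStress, PySem.Set.contains, PySem.Set.add, PySem.Set.ofList, PySem.Dict.getD, PySem.Dict.get?, pv_join_pair]
      · by_cases ho3 : o = "critical"
        · subst ho3
          simp [Ne.symm ho1, Ne.symm ho2, pvTable_mk, pvKnownKinds, pvStress, PySem.Set.contains, PySem.Set.add, PySem.Set.ofList, PySem.Dict.getD, PySem.Dict.get?, pv_join_single]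
        · simp [ho1, ho2, ho3, Ne.symm ho1, Ne.symm ho2, Ne.symm ho3, pvTable_mk, pvKnownKinds, pvStress, PySem.Set.contains, PySem.Set.add, PySem.Set.ofList, PySem.Dict.getD, PySem.Dict.get?]
  ·
    by_cases hk2 : k = "stealth"
    · subst hk2
      by_cases ho1 : o = "failure"
      · subst ho1
        simp [pvTable_mk, pvKnownKinds, pvStress, PySem.Set.contains, PySem.Set.add, PySem.Set.ofList, PySem.Dict.getD, PySem.Dict.get?, pv_join_pair, pv_join_single, pv_ne_izm_mir2]
      · by_cases ho2 : o = "partial"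
        · subst ho2
          simp [Ne.symm ho1, pvTable_mk, pvKnownKinds, pvStress, PySem.Set.contains, PySem.Set.add, PySem.Set.ofList, PySem.Dict.getD, PySem.Dict.get?, pv_join_single]
        · by_cases ho3 : o = "critical"
          · subst ho3
            simp [Ne.symm ho1, Ne.symm ho2, pvTable_mk, pvKnownKinds, pvStress, PySem.Set.contains, PySem.Set.add, PySem.Set.ofList, PySem.Dict.getD, PySem.Dict.get?, pv_join_single]
          · simp [ho1, ho2, ho3, Ne.symm ho1, Ne.symm ho2, Ne.symm ho3, pvTable_mk, pvKnownKinds, pvStress, PySem.Set.contains, PySem.Set.add, PySem.Set.ofList, PySem.Dict.getD, PySem.Dict.get?]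
    ·
      by_cases hk3 : k = "investigation"
      · subst hk3
        by_cases ho1 : o = "failure"
        · subst ho1
          simp [pvTable_mk, pvKnownKinds, pvStress, PySem.Set.contains, PySem.Set.add, PySem.Set.ofList, PySem.Dict.getD, PySem.Dict.get?, pv_join_single]
        · by_cases ho2 : o = "partial"
          · subst ho2
            simp [Ne.symm ho1, pvTable_mk, pvKnownKinds, pvStress, PySem.Set.contains, PySem.Set.add, PySem.Set.ofList, PySem.Dict.getD, PySem.Dict.get?, pv_join_pair]
          · by_cases ho3 : o = "critical"
            · subst ho3
              simp [Ne.symm ho1, Ne.symm ho2, pvTable_mk, pvKnownKinds, pvStress, PySem.Set.contains, PySem.Set.add, PySem.Set.ofList, PySem.Dict.getD, PySem.Dict.get?, pv_join_single]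
            · simp [ho1, ho2, ho3, Ne.symm ho1, Ne.symm ho2, Ne.symm ho3, pvTable_mk, pvKnownKinds, pvStress, PySem.Set.contains, PySem.Set.add, PySem.Set.ofList, PySem.Dict.getD, PySem.Dict.get?]
      ·
        by_cases hk4 : k = "social"
        · subst hk4
          by_cases ho1 : o = "failure"
          · subst ho1
            simp [pvTable_mk, pvKnownKinds, pvStress, PySem.Set.contains, PySem.Set.add, PySem.Set.ofList, PySem.Dict.getD, PySem.Dict.get?, pv_join_pair, pv_join_single, pv_ne_mir1_izm]
          · by_cases ho2 : o = "partial"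
            · subst ho2
              simp [Ne.symm ho1, pvTable_mk, pvKnownKinds, pvStress, PySem.Set.contains, PySem.Set.add, PySem.Set.ofList, PySem.Dict.getD, PySem.Dict.get?, pv_join_pair]
            · simp [ho1, ho2, Ne.symm ho1, Ne.symm ho2, pvTable_mk, pvKnownKinds, pvStress, PySem.Set.contains, PySem.Set.add, PySem.Set.ofList, PySem.Dict.getD, PySem.Dict.get?]
        ·
          by_cases hk5 : k = "mystic"
          · subst hk5
            by_cases ho1 : o = "failure"
            · subst ho1
              simp [pvTable_mk, pvKnownKinds, pvStress, PySem.Set.contains, PySem.Set.add, PySem.Set.ofList, PySem.Dict.getD, PySem.Dict.get?, pv_join_pair, pv_join_single, pv_ne_dark_izm]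
            · by_cases ho2 : o = "partial"
              · subst ho2
                simp [Ne.symm ho1, pvTable_mk, pvKnownKinds, pvStress, PySem.Set.contains, PySem.Set.add, PySem.Set.ofList, PySem.Dict.getD, PySem.Dict.get?, pv_join_pair, pv_join_single, pv_ne_dark_izm]
              · by_cases ho3 : o = "critical"
                · subst ho3
                  simp [Ne.symm ho1, Ne.symm ho2, pvTable_mk, pvKnownKinds, pvStress, PySem.Set.contains, PySem.Set.add, PySem.Set.ofList, PySem.Dict.getD, PySem.Dict.get?, pv_join_single]
                · simp [ho1, ho2, ho3, Ne.symm ho1, Ne.symm ho2, Ne.symm ho3, pvTable_mk, pvKnownKinds, pvStress, PySem.Set.contains, PySem.Set.add, PySem.Set.ofList, PySem.Dict.getD, PySem.Dict.get?]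
          ·
            by_cases hk6 : k = "travel"
            · subst hk6
              by_cases ho1 : o = "failure"
              · subst ho1
                simp [pvTable_mk, pvKnownKinds, pvStress, PySem.Set.contains, PySem.Set.add, PySem.Set.ofList, PySem.Dict.getD, PySem.Dict.get?, pv_join_pair, pv_join_single, pv_ne_threat_izm]
              · by_cases ho2 : o = "partial"
                · subst ho2
                  simp [Ne.symm ho1, pvTable_mk, pvKnownKinds, pvStress, PySem.Set.contains, PySem.Set.add, PySem.Set.ofList, PySem.Dict.getD, PySem.Dict.get?, pv_join_single]
                · simp [ho1, ho2, Ne.symm ho1, Ne.symm ho2, pvTable_mk, pvKnownKinds, pvStress, PySem.Set.contains, PySem.Set.add, PySem.Set.ofList, PySem.Dict.getD, PySem.Dict.get?]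
            ·
              -- unknown action kind: the risk/outcome fallback on both sides
              cases hro : ((r == "high" || r == "extreme") && (o == "failure" || o == "partial")) <;>
                simp [hk1, hk2, hk3, hk4, hk5, hk6, hro, pvKnownKinds, pvStress, PySem.Set.contains, PySem.Set.add, PySem.Set.ofList, pv_join_pair]
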